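-- pv_equiv track=rewrite | github.com/torvictorvic/py-extraction-scripts | global_custom_scripts/pagofacil_parser.py | process_header_2
-- ===== SOURCE A (Python) =====
-- def process_header_2(header):
--     n = [1, 8, 6, 35, 48]
--     res=[]
--     for split in n:
--         temp=header[:split]
--         header=header[split:]
--         res.append(temp)
--     return res
-- ===== SOURCE B (Python) =====
-- def process_header_2(header):
--     lengths = [1, 8, 6, 35, 48]
--     bounds = [0]
--     total = 0
--     for L in lengths:
--         total += L
--         bounds.append(total)
--     return [header[bounds[i]:bounds[i + 1]] for i in range(5)]
-- ===== Notes on version B (the rewrite author's own statement) =====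
-- stated objective: alternative
-- what changed: Instead of repeatedly reassigning (consuming) the header string and taking a prefix each round, B precomputes absolute cut points [0,1,9,15,50,98] by a cumulative sum and slices the unmodified original string with absolute index pairs.
import Mathlib
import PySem

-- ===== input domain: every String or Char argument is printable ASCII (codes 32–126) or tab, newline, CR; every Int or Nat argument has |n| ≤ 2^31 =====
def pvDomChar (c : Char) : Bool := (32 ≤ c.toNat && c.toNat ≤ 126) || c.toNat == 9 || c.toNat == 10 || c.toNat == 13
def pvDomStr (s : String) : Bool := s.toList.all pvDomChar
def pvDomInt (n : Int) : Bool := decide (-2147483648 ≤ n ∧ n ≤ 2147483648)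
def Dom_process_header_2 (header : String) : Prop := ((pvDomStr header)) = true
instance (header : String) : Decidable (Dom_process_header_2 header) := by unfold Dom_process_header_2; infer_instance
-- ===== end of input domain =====

-- B replaces A's consume-the-remainder loop by absolute cut points from a cumulative sum and
-- slices the unmodified string (objective: alternative decomposition, same cost).

-- ===== PORT A =====
def process_header_2 (header : String) : List String :=
  let n : List Int := [1, 8, 6, 35, 48]
  (n.foldl (fun (st : String × List String) split =>
      let temp := PySem.Str.slice st.1 none (some split)
      let header' := PySem.Str.slice st.1 (some split) none
      (header', st.2 ++ [temp]))
    (header, [])).2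

-- ===== PORT B =====
def process_header_2_alt (header : String) : List String :=
  let lengths : List Int := [1, 8, 6, 35, 48]
  let st := lengths.foldl (fun (st : List Int × Int) L =>
      let total := st.2 + L
      (st.1 ++ [total], total)) ([0], 0)
  let bounds := st.1
  (PySem.List.pyRange 0 5 1).map (fun i =>
    PySem.Str.slice header (some (PySem.List.pyGetD bounds i 0)) (some (PySem.List.pyGetD bounds (i + 1) 0)))

-- ===== PRECONDITION & SPEC =====
def Spec_process_header_2 (header : String) (out : List String) : Prop := out = process_header_2_alt header
instance (header : String) (out : List String) : Decidable (Spec_process_header_2 header out) := by unfold Spec_process_header_2; infer_instance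

-- ===== CLAIM (what is proved, stated in full; the proofs are below) =====
def Claim_equal_process_header_2 : Prop := ∀ (header : String), Dom_process_header_2 header → Spec_process_header_2 header (process_header_2 header)

-- ===== LEMMAS AND PROOFS =====

theorem pv_slice2 (l : List Char) :
  PySem.List.slice (PySem.List.slice l (some 1)) none (some 8) = PySem.List.slice l (some 1) (some 9) := by
  simp [pysem]

theorem pv_slice3 (l : List Char) :
  PySem.List.slice (PySem.List.slice (PySem.List.slice l (some 1)) (some 8)) none (some 6)
    = PySem.List.slice l (some 9) (some 15) := by
  simp [pysem]

theorem pv_slice4 (l : List Char) :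
  PySem.List.slice (PySem.List.slice (PySem.List.slice (PySem.List.slice l (some 1)) (some 8)) (some 6)) none (some 35)
    = PySem.List.slice l (some 15) (some 50) := by
  simp [pysem]

theorem pv_slice5 (l : List Char) :
  PySem.List.slice (PySem.List.slice (PySem.List.slice (PySem.List.slice (PySem.List.slice l (some 1)) (some 8)) (some 6)) (some 35)) none (some 48)
    = PySem.List.slice l (some 50) (some 98) := by
  simp [pysem]

-- ===== VERDICT (by name: the statement is the Claim_ definition above) =====
theorem process_header_2_spec : Claim_equal_process_header_2 := by
  intro header _
  unfold Spec_process_header_2 process_header_2 process_header_2_alt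
  simp [PySem.List.pyRange, PySem.List.pyGetD, PySem.List.pyIdx?, PySem.List.pyGet?,
    PySem.Str.slice, List.foldl]
  simp only [List.range_succ, List.range_zero, List.map_cons, List.map_nil,
    List.nil_append, Function.comp, List.cons_append]
  norm_num
  rw [pv_slice2 header.toList, pv_slice3 header.toList, pv_slice4 header.toList,
    pv_slice5 header.toList]
  exact ⟨rfl, rfl, rfl, rfl⟩
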